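-- pv_equiv track=rewrite | github.com/KODtheone/algorithem-template-python | dp/LIS.py | RANKER
-- ===== SOURCE A (Python) =====
-- def RANKER(arr):
--     n = len(arr)
--     temp = arr.copy()
--     temp.sort()
--     rank = {}
--     mx = 0
--     for i in range(n):
--         if temp[i] not in rank:
--             rank[temp[i]] = mx
--             mx += 1
--     for i in range(n):
--         arr[i] = rank[arr[i]]
--     return mx
-- ===== SOURCE B (Python) =====
-- def RANKER(arr):
--     n = len(arr)
--     order = sorted(range(n), key=lambda i: arr[i])
--     prev = None
--     mx = 0
--     rank_val = 0
--     for i in order: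
--         v = arr[i]
--         if prev is None or v != prev:
--             rank_val = mx
--             mx += 1
--             prev = v
--         arr[i] = rank_val
--     return mx
-- ===== Notes on version B (the rewrite author's own statement) =====
-- stated objective: alternative
-- what changed: Instead of sorting a value copy, building a rank dict over it and then remapping arr in a second dict-lookup pass, B sorts the index permutation by value and walks it once with a prev sentinel and a counter, assigning ranks in place as it goes; the rank dict and the second pass disappear.
import Mathlib
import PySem

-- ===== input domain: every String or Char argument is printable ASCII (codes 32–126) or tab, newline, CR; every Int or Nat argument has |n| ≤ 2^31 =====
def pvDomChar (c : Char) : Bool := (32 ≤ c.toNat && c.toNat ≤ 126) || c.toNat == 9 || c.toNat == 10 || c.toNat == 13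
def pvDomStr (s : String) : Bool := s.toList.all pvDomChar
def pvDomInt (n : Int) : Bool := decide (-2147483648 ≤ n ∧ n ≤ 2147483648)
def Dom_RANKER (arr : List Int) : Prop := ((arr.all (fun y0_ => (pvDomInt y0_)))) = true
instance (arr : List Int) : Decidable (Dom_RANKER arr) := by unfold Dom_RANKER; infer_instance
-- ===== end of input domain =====

-- B replaces A's sort-copy + rank-dict + second remap pass with one walk over the index
-- permutation sorted by value, using a prev sentinel (objective: alternative decomposition).
-- Both Pythons mutate arr in place identically; the theorems below are about the RETURN value.

-- ===== PORT A =====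
-- A: temp = sorted(arr); for i in range(n): if temp[i] not in rank: rank[temp[i]] = mx; mx += 1
-- then a second loop rewriting arr in place (side effect only; bound to _arr, unused by the return).
def RANKER (arr : List Int) : Int :=
  let n : Int := arr.length
  let temp := PySem.List.sorted arr (fun x => x) false
  let st :=
    (PySem.List.pyRange 0 n 1).foldl
      (fun (st : PySem.Dict Int Int × Int) i =>
        let t := PySem.List.pyGetD temp i 0
        if st.1.contains t then st else (st.1.insert t st.2, st.2 + 1))
      (PySem.Dict.empty, 0)
  -- second pass arr[i] = rank[arr[i]]; rank[arr[i]] never raises (every arr value is a key),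
  -- so getD 0 is exact here; the written list is the in-place mutation, unused by the return
  let _arr :=
    (PySem.List.pyRange 0 n 1).foldl
      (fun (a : List Int) i =>
        PySem.List.pySetD a i (st.1.getD (PySem.List.pyGetD a i 0) 0)) arr
  st.2

-- ===== PORT B =====
-- B: order = sorted(range(n), key=lambda i: arr[i]); walk it with prev sentinel (Option Int) and mx.
-- Each index appears once in order, so every read arr[i] happens before the in-place write arr[i] =
-- rank_val and sees the original value: reading from the argument list is exact; the writes are the
-- in-place mutation, not part of the return value.
def RANKER_alt (arr : List Int) : Int :=
  let n : Int := arr.length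
  let order := PySem.List.sorted (PySem.List.pyRange 0 n 1) (fun i => PySem.List.pyGetD arr i 0) false
  let st :=
    order.foldl
      (fun (st : Option Int × Int) i =>
        let v := PySem.List.pyGetD arr i 0
        match st.1 with
        | none => (some v, st.2 + 1)
        | some p => if v = p then st else (some v, st.2 + 1))
      (none, 0)
  st.2

-- ===== PRECONDITION & SPEC =====
def Spec_RANKER (arr : List Int) (out : Int) : Prop := out = RANKER_alt arr
instance (arr : List Int) (out : Int) : Decidable (Spec_RANKER arr out) := by unfold Spec_RANKER; infer_instance

-- ===== CLAIM (what is proved, stated in full; the proofs are below) =====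
def Claim_equal_RANKER : Prop := ∀ (arr : List Int), Dom_RANKER arr → Spec_RANKER arr (RANKER arr)

-- ===== LEMMAS AND PROOFS =====

-- A's counting loop, as a structural fold over the sorted value list
def rankerFoldA (s : List Int) (st : PySem.Dict Int Int × Int) : PySem.Dict Int Int × Int :=
  s.foldl (fun st t => if st.1.contains t then st else (st.1.insert t st.2, st.2 + 1)) st

-- B's counting loop, as a structural fold over the visited value sequence
def rankerFoldB (s : List Int) (st : Option Int × Int) : Option Int × Int :=
  s.foldl
    (fun st v =>
      match st.1 with
      | none => (some v, st.2 + 1)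
      | some p => if v = p then st else (some v, st.2 + 1)) st

-- Joint invariant: on a ≤-sorted remainder s, A's dict d and B's prev p track each other —
-- p is the maximum key of d (or both are empty) and every element of s is ≥ p.
theorem rankerFold_eq (s : List Int) (d : PySem.Dict Int Int) (m mb : Int) (p : Option Int)
    (hs : s.Pairwise (· ≤ ·))
    (hinv : (p = none ∧ ∀ x, d.contains x = false) ∨
            (∃ v, p = some v ∧ d.contains v = true ∧
               (∀ x, d.contains x = true → x ≤ v) ∧ (∀ y ∈ s, v ≤ y))) :
    (rankerFoldA s (d, m)).2 - m = (rankerFoldB s (p, mb)).2 - mb := by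
  induction s generalizing d m mb p with
  | nil => simp [rankerFoldA, rankerFoldB]
  | cons h t ih =>
    have htail : t.Pairwise (· ≤ ·) := (List.pairwise_cons.mp hs).2
    have hle : ∀ y ∈ t, h ≤ y := (List.pairwise_cons.mp hs).1
    rcases hinv with ⟨hp, hd⟩ | ⟨v, hp, hdv, hmax, hlo⟩
    · -- first element: both create a new rank
      subst hp
      simp only [rankerFoldA, rankerFoldB, List.foldl_cons, hd h, Bool.false_eq_true, if_false]
      have := ih (d.insert h m) (m + 1) (mb + 1) (some h) htail
        (Or.inr ⟨h, rfl, PySem.Dict.contains_insert_self .., by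
          intro x hx
          rw [PySem.Dict.contains_insert] at hx
          simp only [Bool.or_eq_true, beq_iff_eq] at hx
          rcases hx with hx | hx
          · exact le_of_eq hx
          · simp [hd x] at hx, hle⟩)
      simp only [rankerFoldA, rankerFoldB] at this ⊢
      omega
    · subst hp
      by_cases hvh : h = v
      · -- repeat of the previous value: both keep their state
        subst hvh
        simp only [rankerFoldA, rankerFoldB, List.foldl_cons, hdv, if_true]
        exact ih d m mb (some h) htail (Or.inr ⟨h, rfl, hdv, hmax, hle⟩)
      · -- strictly new value: both create a new rank
        have hhd : d.contains h = false := by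
          by_contra hc
          have hct : d.contains h = true := by revert hc; cases d.contains h <;> simp
          exact hvh (le_antisymm (hmax h hct) (hlo h (List.mem_cons_self ..)))
        simp only [rankerFoldA, rankerFoldB, List.foldl_cons, hhd, Bool.false_eq_true, if_false,
          if_neg hvh]
        have := ih (d.insert h m) (m + 1) (mb + 1) (some h) htail
          (Or.inr ⟨h, rfl, PySem.Dict.contains_insert_self .., by
            intro x hx
            rw [PySem.Dict.contains_insert] at hx
            simp only [Bool.or_eq_true, beq_iff_eq] at hx
            rcases hx with hx | hx
            · exact le_of_eq hx
            · exact le_trans (hmax x hx) (hlo h (List.mem_cons_self ..)), hle⟩)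
        simp only [rankerFoldA, rankerFoldB] at this ⊢
        omega

-- The value sequence B visits (order mapped through arr) IS sorted(arr)
theorem ranker_values_eq (arr : List Int) :
    (PySem.List.sorted (PySem.List.pyRange 0 (arr.length : Int) 1)
        (fun i => PySem.List.pyGetD arr i 0) false).map (fun i => PySem.List.pyGetD arr i 0)
      = PySem.List.sorted arr (fun x => x) false := by
  apply Eq.symm
  apply PySem.List.eq_of_perm_of_pairwise_le_of_injective (fun x : Int => x) (fun _ _ h => h)
  · -- both are permutations of arr
    have h1 : (PySem.List.sorted arr (fun x : Int => x) false).Perm arr :=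
      PySem.List.sorted_perm ..
    have h2 : ((PySem.List.sorted (PySem.List.pyRange 0 (arr.length : Int) 1)
        (fun i => PySem.List.pyGetD arr i 0) false).map (fun i => PySem.List.pyGetD arr i 0)).Perm
        ((PySem.List.pyRange 0 (arr.length : Int) 1).map (fun i => PySem.List.pyGetD arr i 0)) :=
      (PySem.List.sorted_perm ..).map _
    rw [PySem.List.map_pyGetD_pyRange_zero'] at h2
    exact h1.trans h2.symm
  · simpa using PySem.List.sorted_pairwise arr (fun x : Int => x)
  · simpa using PySem.List.sorted_map_key_pairwise
      (PySem.List.pyRange 0 (arr.length : Int) 1) (fun i => PySem.List.pyGetD arr i 0)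

-- ===== VERDICT (by name: the statement is the Claim_ definition above) =====
theorem RANKER_spec : Claim_equal_RANKER := by
  intro arr _
  unfold Spec_RANKER RANKER RANKER_alt
  simp only []
  -- A's index loop over range(n) reading temp[i] is the structural fold over temp
  have hA : (PySem.List.pyRange 0 (arr.length : Int) 1).foldl
      (fun (st : PySem.Dict Int Int × Int) i =>
        if st.1.contains (PySem.List.pyGetD (PySem.List.sorted arr (fun x => x) false) i 0) then st
        else (st.1.insert (PySem.List.pyGetD (PySem.List.sorted arr (fun x => x) false) i 0) st.2,
              st.2 + 1))
      (PySem.Dict.empty, 0)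
      = rankerFoldA (PySem.List.sorted arr (fun x => x) false) (PySem.Dict.empty, 0) := by
    have hlen : (arr.length : Int) = ((PySem.List.sorted arr (fun x => x) false).length : Int) := by
      rw [PySem.List.length_sorted]
    rw [hlen]
    exact PySem.List.foldl_pyRange_zero_pyGetD' (PySem.List.sorted arr (fun x => x) false) 0
      (fun (st : PySem.Dict Int Int × Int) t =>
        if st.1.contains t then st else (st.1.insert t st.2, st.2 + 1))
      ((PySem.Dict.empty, 0) : PySem.Dict Int Int × Int)
  -- B's loop over the sorted index permutation is the fold over the visited values
  have hB : (PySem.List.sorted (PySem.List.pyRange 0 (arr.length : Int) 1)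
        (fun i => PySem.List.pyGetD arr i 0) false).foldl
      (fun (st : Option Int × Int) i =>
        match st.1 with
        | none => (some (PySem.List.pyGetD arr i 0), st.2 + 1)
        | some p => if PySem.List.pyGetD arr i 0 = p then st
                    else (some (PySem.List.pyGetD arr i 0), st.2 + 1))
      (none, 0)
      = rankerFoldB (PySem.List.sorted arr (fun x => x) false) (none, 0) := by
    rw [rankerFoldB, ← ranker_values_eq arr, List.foldl_map]
  rw [hA, hB]
  have hsorted : (PySem.List.sorted arr (fun x => x) false).Pairwise (· ≤ ·) := by
    simpa using PySem.List.sorted_pairwise arr (fun x : Int => x)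
  have hempty : ∀ x : Int, (PySem.Dict.empty : PySem.Dict Int Int).contains x = false := by
    intro x; rfl
  have := rankerFold_eq (PySem.List.sorted arr (fun x => x) false)
    PySem.Dict.empty 0 0 none hsorted (Or.inl ⟨rfl, hempty⟩)
  omega
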